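-- pv_equiv track=rewrite | github.com/lucio-karin0506/algorism-study | algorism lecture/ch5 binary search.py | get_dduck_length
-- ===== SOURCE A (Python) =====
-- def get_dduck_length(N, M, dduck_length):
--     # 이진 탐색 위한 시작, 끝 설정
--     start = 0
--     end = max(dduck_length)
--
--     # 이진 탐색 수행
--     result = 0
--     while start <= end:
--         total = 0
--         mid = (start + end) // 2
--
--         for x in dduck_length:
--             # 잘랐을 때 떡의 양 계산
--             if x > mid:
--                 total += (x - mid)
--
--         # 떡의 양이 부족한 경우 더 많이 자르기(왼쪽 부분 탐색)
--         if total < M: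
--             end = mid - 1
--         # 떡의 양이 충분한 경우 덜 자르기(오른쪽 부분 탐색)
--         else:
--             result = mid # 최대한 덜 잘랐을 때가 정답이므로 여기에 result 기록
--             start = mid + 1
--
--     return result
-- ===== SOURCE B (Python) =====
-- def get_dduck_length(N, M, dduck_length):
--     # Sort descending and precompute prefix sums: the cut amount at any
--     # candidate height is then a closed form in the partition index.
--     a = sorted(dduck_length, reverse=True)
--     pre = [0]
--     s = 0
--     for x in a:
--         s += x
--         pre.append(s)
--     n = len(a)
--     lo, hi = 0, a[0]
--     best = 0
--     while lo <= hi: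
--         mid = (lo + hi) // 2
--         # number of sticks taller than mid = first index with a[i] <= mid
--         i, j = 0, n
--         while i < j:
--             k = (i + j) // 2
--             if a[k] > mid:
--                 i = k + 1
--             else:
--                 j = k
--         cut = pre[i] - i * mid
--         if cut >= M:
--             best = mid
--             lo = mid + 1
--         else:
--             hi = mid - 1
--     return best
-- ===== Notes on version B (the rewrite author's own statement) =====
-- stated objective: alternative
-- what changed: A rescans the whole list to compute the cut amount at every probe of the height binary search; B sorts once, precomputes prefix sums, and computes each probe's cut amount in closed form via an inner binary search for the partition index; Pre_ excludes only the empty list, on which A's max() raises ValueError.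
import Mathlib
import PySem

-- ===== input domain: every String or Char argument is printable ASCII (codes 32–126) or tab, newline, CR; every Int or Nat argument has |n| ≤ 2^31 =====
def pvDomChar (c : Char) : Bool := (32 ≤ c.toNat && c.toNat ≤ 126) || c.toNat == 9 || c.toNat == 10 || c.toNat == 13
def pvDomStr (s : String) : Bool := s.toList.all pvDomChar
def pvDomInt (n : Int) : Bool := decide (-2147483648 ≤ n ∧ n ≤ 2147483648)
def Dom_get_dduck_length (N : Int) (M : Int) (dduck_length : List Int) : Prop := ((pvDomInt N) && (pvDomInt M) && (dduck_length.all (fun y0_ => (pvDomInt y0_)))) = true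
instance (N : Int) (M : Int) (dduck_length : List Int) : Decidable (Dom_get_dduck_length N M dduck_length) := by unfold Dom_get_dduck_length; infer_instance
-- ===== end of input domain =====

-- B sorts once and keeps prefix sums, so each probe of the height search computes the
-- cut amount in closed form via an index bisection instead of a rescan (objective: alternative).

-- ===== PORT A =====
-- the inner 'for x in dduck_length' accumulation of cut amounts
def pvTotal (mid : Int) (l : List Int) : Int :=
  l.foldl (fun total x => if mid < x then total + (x - mid) else total) 0

-- the 'while start <= end' binary-search loop of A
def pvALoop (M : Int) (l : List Int) (start e result : Int) : Int :=
  if h : start ≤ e then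
    let mid := PySem.Int.floordiv (start + e) 2
    if pvTotal mid l < M then
      pvALoop M l start (mid - 1) result
    else
      pvALoop M l (mid + 1) e mid
  else result
termination_by (e + 1 - start).toNat
decreasing_by
  all_goals
    have hb := PySem.Int.floordiv_two_mid_bounds h
    omega

def get_dduck_length (N : Int) (M : Int) (dduck_length : List Int) : Int :=
  pvALoop M dduck_length 0 ((PySem.List.max? dduck_length (fun x => x)).getD 0) 0

-- ===== PORT B =====
-- the 'pre = [0]; for x in a: s += x; pre.append(s)' prefix-sum build of Source B
def pvPre (s : Int) : List Int → List Int
  | [] => [s]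
  | x :: xs => s :: pvPre (s + x) xs

-- the inner 'while i < j' loop of Source B: first index of the descending list a with a[k] <= mid
def pvBisect (a : List Int) (mid : Int) (i j : Int) : Int :=
  if h : i < j then
    let k := PySem.Int.floordiv (i + j) 2
    if mid < PySem.List.pyGetD a k 0 then
      pvBisect a mid (k + 1) j
    else
      pvBisect a mid i k
  else i
termination_by (j - i).toNat
decreasing_by
  all_goals
    have hb := PySem.Int.floordiv_two_mid_bounds (le_of_lt h)
    have hlt : PySem.Int.floordiv (i + j) 2 < j :=
      (PySem.Int.floordiv_lt_iff_lt_mul (by omega)).2 (by omega)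
    omega

-- the outer 'while lo <= hi' loop of Source B
def pvBLoop (M : Int) (a pre : List Int) (n lo hi best : Int) : Int :=
  if h : lo ≤ hi then
    let mid := PySem.Int.floordiv (lo + hi) 2
    let i := pvBisect a mid 0 n
    let cut := PySem.List.pyGetD pre i 0 - i * mid
    if M ≤ cut then
      pvBLoop M a pre n (mid + 1) hi mid
    else
      pvBLoop M a pre n lo (mid - 1) best
  else best
termination_by (hi + 1 - lo).toNat
decreasing_by
  all_goals
    have hb := PySem.Int.floordiv_two_mid_bounds h
    omega

def get_dduck_length_alt (N : Int) (M : Int) (dduck_length : List Int) : Int :=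
  let a := PySem.List.sorted dduck_length (fun x => x) true
  -- a[0] raises IndexError in Python on []; pyGetD is its total form, unreachable under Pre_
  pvBLoop M a (pvPre 0 a) a.length 0 (PySem.List.pyGetD a 0 0) 0

-- ===== PRECONDITION & SPEC =====
-- Pre_ excludes only the empty list, on which A's max() raises ValueError (and B's a[0] IndexError).
def Pre_get_dduck_length (N : Int) (M : Int) (dduck_length : List Int) : Prop := dduck_length ≠ []
instance (N : Int) (M : Int) (dduck_length : List Int) : Decidable (Pre_get_dduck_length N M dduck_length) := by unfold Pre_get_dduck_length; infer_instance

def pvWitness_get_dduck_length : Int × Int × List Int := (4, 6, [19, 14, 10, 17])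

def Spec_get_dduck_length (N : Int) (M : Int) (dduck_length : List Int) (out : Int) : Prop := out = get_dduck_length_alt N M dduck_length
instance (N : Int) (M : Int) (dduck_length : List Int) (out : Int) : Decidable (Spec_get_dduck_length N M dduck_length out) := by unfold Spec_get_dduck_length; infer_instance

-- ===== CLAIM (what is proved, stated in full; the proofs are below) =====
def Claim_equal_get_dduck_length : Prop := ∀ (N : Int) (M : Int) (dduck_length : List Int), Dom_get_dduck_length N M dduck_length → Pre_get_dduck_length N M dduck_length → Spec_get_dduck_length N M dduck_length (get_dduck_length N M dduck_length)

-- ===== LEMMAS AND PROOFS =====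

-- pvTotal as a sum of clamped differences
theorem pvTotal_eq_sum (mid : Int) (l : List Int) :
    pvTotal mid l = (l.map (fun x => max (x - mid) 0)).sum := by
  suffices h : ∀ (l : List Int) (acc : Int),
      l.foldl (fun total x => if mid < x then total + (x - mid) else total) acc
        = acc + (l.map (fun x => max (x - mid) 0)).sum by
    simpa [pvTotal] using h l 0
  intro l
  induction l with
  | nil => intro acc; simp
  | cons x xs ih =>
    intro acc
    rw [List.foldl_cons, ih, List.map_cons, List.sum_cons, max_def]
    split_ifs <;> omega

theorem pvTotal_perm (mid : Int) {l l' : List Int} (hp : l.Perm l') :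
    pvTotal mid l = pvTotal mid l' := by
  rw [pvTotal_eq_sum, pvTotal_eq_sum]
  exact (hp.map _).sum_eq

theorem pvSum_tall (h : Int) (p : List Int) (hall : ∀ x ∈ p, h < x) :
    (p.map (fun x => max (x - h) 0)).sum = p.sum - p.length * h := by
  induction p with
  | nil => simp
  | cons y ys ih =>
    have hy : max (y - h) 0 = y - h := max_eq_left (by have := hall y (by simp); omega)
    rw [List.map_cons, List.sum_cons, hy, ih (fun x hx => hall x (by simp [hx]))]
    push_cast [List.length_cons, List.sum_cons]
    ring

theorem pvTotal_eq_prefix (h : Int) (p r : List Int)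
    (hall : ∀ x ∈ p, h < x) (hrest : ∀ x ∈ r, x ≤ h) :
    pvTotal h (p ++ r) = p.sum - p.length * h := by
  rw [pvTotal_eq_sum, List.map_append, List.sum_append, pvSum_tall h p hall]
  have h2 : (r.map (fun x => max (x - h) 0)).sum = 0 := by
    apply List.sum_eq_zero
    intro x hx
    obtain ⟨y, hy, rfl⟩ := List.mem_map.1 hx
    exact max_eq_right (by have := hrest y hy; omega)
  rw [h2]
  ring

-- prefix-sum list: lookup is the partial sum
theorem pvPre_getD (a : List Int) : ∀ (s : Int) (k : Nat), k ≤ a.length →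
    (pvPre s a).getD k 0 = s + (a.take k).sum := by
  induction a with
  | nil =>
    intro s k hk
    have hk0 : k = 0 := by simpa using hk
    subst hk0
    simp [pvPre]
  | cons x xs ih =>
    intro s k hk
    cases k with
    | zero => simp [pvPre]
    | succ k =>
      have hih := ih (s + x) k (by simpa using hk)
      simp only [pvPre, List.getD_cons_succ, List.take_succ_cons, List.sum_cons, hih]
      ring

-- the inner bisection on a descending list returns the partition point
theorem pvBisect_spec (a : List Int) (mid : Int)
    (hmono : ∀ p q : Nat, p ≤ q → q < a.length → a.getD q 0 ≤ a.getD p 0) :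
    ∀ (fuel : Nat) (i j : Int), (j - i).toNat ≤ fuel →
    0 ≤ i → i ≤ j → j ≤ (a.length : Int) →
    (∀ k : Nat, k < i.toNat → mid < a.getD k 0) →
    (∀ k : Nat, j.toNat ≤ k → k < a.length → a.getD k 0 ≤ mid) →
    0 ≤ pvBisect a mid i j ∧ pvBisect a mid i j ≤ (a.length : Int) ∧
    (∀ k : Nat, k < (pvBisect a mid i j).toNat → mid < a.getD k 0) ∧
    (∀ k : Nat, (pvBisect a mid i j).toNat ≤ k → k < a.length → a.getD k 0 ≤ mid) := by
  intro fuel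
  induction fuel with
  | zero =>
    intro i j hf h0 hij hjn hlow hhigh
    have hji : ¬ i < j := by omega
    rw [pvBisect, dif_neg hji]
    exact ⟨h0, by omega, hlow, fun k hk hkn => hhigh k (by omega) hkn⟩
  | succ fuel ih =>
    intro i j hf h0 hij hjn hlow hhigh
    by_cases hlt : i < j
    · rw [pvBisect, dif_pos hlt]
      have hb := PySem.Int.floordiv_two_mid_bounds (le_of_lt hlt)
      set k := PySem.Int.floordiv (i + j) 2 with hk
      have hkj : k < j := (PySem.Int.floordiv_lt_iff_lt_mul (by omega)).2 (by omega)
      have hkn : k.toNat < a.length := by omega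
      have hget : PySem.List.pyGetD a k 0 = a.getD k.toNat 0 :=
        PySem.List.pyGetD_of_nonneg a 0 (by omega)
      by_cases hc : mid < PySem.List.pyGetD a k 0
      · rw [if_pos hc]
        apply ih (k + 1) j (by omega) (by omega) (by omega) hjn
        · intro p hp
          have hpk : p ≤ k.toNat := by omega
          have := hmono p k.toNat hpk hkn
          rw [hget] at hc
          omega
        · exact hhigh
      · rw [if_neg hc]
        apply ih i k (by omega) h0 (by omega) (by omega) hlow
        intro p hkp hpn
        have := hmono k.toNat p (by omega) hpn
        rw [hget] at hc
        omega
    · rw [pvBisect, dif_neg hlt]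
      exact ⟨h0, by omega, hlow, fun k hk hkn => hhigh k (by omega) hkn⟩

-- the closed-form cut of B equals A's rescanned total
theorem pvCut_eq (l : List Int) (mid : Int) :
    PySem.List.pyGetD (pvPre 0 (PySem.List.sorted l (fun x => x) true))
        (pvBisect (PySem.List.sorted l (fun x => x) true) mid 0
          ((PySem.List.sorted l (fun x => x) true).length)) 0
      - (pvBisect (PySem.List.sorted l (fun x => x) true) mid 0
          ((PySem.List.sorted l (fun x => x) true).length)) * mid
      = pvTotal mid l := by
  set a := PySem.List.sorted l (fun x => x) true with ha
  have hperm : a.Perm l := PySem.List.sorted_perm l (fun x => x) true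
  have hpair : a.Pairwise (fun x y => y ≤ x) := PySem.List.sorted_pairwise_rev l (fun x => x)
  have hmono : ∀ p q : Nat, p ≤ q → q < a.length → a.getD q 0 ≤ a.getD p 0 := by
    intro p q hpq hq
    rcases Nat.eq_or_lt_of_le hpq with rfl | hlt
    · exact le_rfl
    · have h := List.pairwise_iff_getElem.1 hpair p q (by omega) hq hlt
      rw [List.getD_eq_getElem a 0 hq, List.getD_eq_getElem a 0 (Nat.lt_of_le_of_lt hpq hq)]
      exact h
  obtain ⟨h0, hn, hlow, hhigh⟩ := pvBisect_spec a mid hmono a.length 0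
    (a.length : Int) (by omega) le_rfl (by omega) (by omega)
    (by intro k hk; omega) (by intro k hk hkn; omega)
  set r := pvBisect a mid 0 (a.length : Int) with hr
  have hrn : r.toNat ≤ a.length := by omega
  have hsplit : a = a.take r.toNat ++ a.drop r.toNat := (List.take_append_drop _ a).symm
  have htake : ∀ x ∈ a.take r.toNat, mid < x := by
    intro x hx
    obtain ⟨k, hk, hget⟩ := List.mem_iff_getElem.1 hx
    have hk' : k < r.toNat := by
      have := hk
      simp [List.length_take] at this
      omega
    have hka : k < a.length := by omega
    have hl := hlow k hk'
    rw [List.getD_eq_getElem a 0 hka] at hl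
    rw [← hget, List.getElem_take]
    exact hl
  have hdrop : ∀ x ∈ a.drop r.toNat, x ≤ mid := by
    intro x hx
    obtain ⟨k, hk, hget⟩ := List.mem_iff_getElem.1 hx
    have hkl : r.toNat + k < a.length := by
      have := hk; simp [List.length_drop] at this; omega
    have hh := hhigh (r.toNat + k) (by omega) hkl
    rw [List.getD_eq_getElem a 0 hkl] at hh
    rw [← hget, List.getElem_drop]
    exact hh
  have htot : pvTotal mid l = (a.take r.toNat).sum - (a.take r.toNat).length * mid := by
    rw [← pvTotal_perm mid hperm]
    calc pvTotal mid a = pvTotal mid (a.take r.toNat ++ a.drop r.toNat) := by rw [← hsplit]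
      _ = _ := pvTotal_eq_prefix mid _ _ htake hdrop
  have hpre : PySem.List.pyGetD (pvPre 0 a) r 0 = (a.take r.toNat).sum := by
    rw [PySem.List.pyGetD_of_nonneg (pvPre 0 a) 0 h0, pvPre_getD a 0 r.toNat hrn]
    ring
  have hlen : ((a.take r.toNat).length : Int) = r := by
    simp [List.length_take, Nat.min_eq_left hrn]
    omega
  rw [hpre, htot, hlen]

-- the two binary-search loops agree step for step
theorem pvLoop_eq (M : Int) (l : List Int) :
    ∀ (fuel : Nat) (lo hi best : Int), (hi + 1 - lo).toNat ≤ fuel →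
    pvALoop M l lo hi best
      = pvBLoop M (PySem.List.sorted l (fun x => x) true)
          (pvPre 0 (PySem.List.sorted l (fun x => x) true))
          ((PySem.List.sorted l (fun x => x) true).length) lo hi best := by
  intro fuel
  induction fuel with
  | zero =>
    intro lo hi best hf
    have h : ¬ lo ≤ hi := by omega
    rw [pvALoop, dif_neg h, pvBLoop, dif_neg h]
  | succ fuel ih =>
    intro lo hi best hf
    by_cases h : lo ≤ hi
    · rw [pvALoop, dif_pos h, pvBLoop, dif_pos h]
      have hb := PySem.Int.floordiv_two_mid_bounds h
      set mid := PySem.Int.floordiv (lo + hi) 2 with hmid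
      have hcut := pvCut_eq l mid
      simp only [hcut]
      by_cases hc : pvTotal mid l < M
      · rw [if_pos hc, if_neg (by omega)]
        exact ih lo (mid - 1) best (by omega)
      · rw [if_neg hc, if_pos (by omega)]
        exact ih (mid + 1) hi mid (by omega)
    · rw [pvALoop, dif_neg h, pvBLoop, dif_neg h]

-- ===== VERDICT (by name: the statement is the Claim_ definition above) =====
theorem get_dduck_length_spec : Claim_equal_get_dduck_length := by
  intro N M l hdom hpre
  unfold Spec_get_dduck_length get_dduck_length get_dduck_length_alt
  have hperm : (PySem.List.sorted l (fun x => x) true).Perm l :=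
    PySem.List.sorted_perm l (fun x => x) true
  obtain ⟨m, hm⟩ : ∃ m, PySem.List.max? l (fun x => x) = some m := by
    cases hq : PySem.List.max? l (fun x => x) with
    | none => exact absurd ((PySem.List.max?_eq_none_iff l (fun x => x)).1 hq) hpre
    | some m => exact ⟨m, rfl⟩
  obtain ⟨v, tb, hbv⟩ : ∃ v tb, PySem.List.sorted l (fun x => x) true = v :: tb := by
    cases hsb : PySem.List.sorted l (fun x => x) true with
    | nil =>
      rw [hsb] at hperm
      exact absurd hperm.symm.eq_nil hpre
    | cons v tb => exact ⟨v, tb, rfl⟩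
  have hvm : v = m := by
    have h1 : v ≤ m := PySem.List.max?_isMax hm v (hperm.subset (by rw [hbv]; simp))
    have h2 : m ≤ v := PySem.List.key_head_sorted_rev_ge l (fun x => x) hbv m
      (PySem.List.max?_mem hm)
    omega
  have hhead : PySem.List.pyGetD (PySem.List.sorted l (fun x => x) true) 0 0 = m := by
    rw [hbv, PySem.List.pyGetD_zero_cons, hvm]
  show pvALoop M l 0 ((PySem.List.max? l (fun x => x)).getD 0) 0
      = pvBLoop M (PySem.List.sorted l (fun x => x) true)
          (pvPre 0 (PySem.List.sorted l (fun x => x) true))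
          ((PySem.List.sorted l (fun x => x) true).length) 0
          (PySem.List.pyGetD (PySem.List.sorted l (fun x => x) true) 0 0) 0
  rw [hm, Option.getD_some, hhead]
  exact pvLoop_eq M l (m + 1 - 0).toNat 0 m 0 le_rfl
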